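-- pv_equiv track=rewrite | github.com/kapumota/Actividades-CC3S2 | 2024-2/Semana1/PruebaEntrada/Pregunta3.py | _binary_search_in_page
-- ===== SOURCE A (Python) =====
-- def _binary_search_in_page(page, target):
--     """Realiza una búsqueda binaria dentro de una página de registros."""
--     low, high = 0, len(page) - 1
--     while low <= high:
--         mid = (low + high) // 2
--         record = page[mid].split(',')[0]  # Suponiendo que el índice está en la primera columna
--         if record == target:
--             return page[mid]
--         elif record < target:
--             low = mid + 1
--         else:
--             high = mid - 1
--     return None
-- ===== SOURCE B (Python) =====
-- def _binary_search_in_page(page, target):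
--     """Recursive binary search over shrinking sub-segments instead of index bounds."""
--     def go(seg):
--         if not seg:
--             return None
--         m = (len(seg) - 1) // 2
--         key = seg[m].split(',')[0]
--         if key == target:
--             return seg[m]
--         if key < target:
--             return go(seg[m + 1:])
--         return go(seg[:m])
--     return go(page)
-- ===== Notes on version B (the rewrite author's own statement) =====
-- stated objective: alternative
-- what changed: Replaces the iterative while-loop over mutable (low, high) index bounds with a recursive helper that binary-searches a shrinking list segment via slicing (segment midpoint (len-1)//2 picks the identical element), with no index bookkeeping.
import Mathlib
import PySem

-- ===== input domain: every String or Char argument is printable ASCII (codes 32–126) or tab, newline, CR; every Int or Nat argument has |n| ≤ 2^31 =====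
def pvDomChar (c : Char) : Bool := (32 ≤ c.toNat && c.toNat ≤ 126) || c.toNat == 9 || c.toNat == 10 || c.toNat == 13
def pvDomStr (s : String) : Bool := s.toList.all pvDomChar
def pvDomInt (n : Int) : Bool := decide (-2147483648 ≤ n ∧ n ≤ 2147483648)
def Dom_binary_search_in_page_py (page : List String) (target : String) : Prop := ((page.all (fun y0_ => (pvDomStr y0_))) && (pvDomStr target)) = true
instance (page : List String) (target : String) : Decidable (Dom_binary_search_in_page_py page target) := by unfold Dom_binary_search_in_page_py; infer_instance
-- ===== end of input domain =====

-- B re-implements A's index-bound while-loop as a structural recursion on shrinking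
-- list segments (slices); same results, a different decomposition (objective: alternative).

-- ===== PORT A =====
-- the while-loop of A over the mutable bounds (low, high)
def pvALoop (page : List String) (target : String) (low high : Int) : Option String :=
  if _h : low ≤ high then
    let mid := PySem.Int.floordiv (low + high) 2
    match PySem.List.pyGet? page mid with
    | none => none  -- unreachable: the loop keeps 0 ≤ low ≤ mid ≤ high < len(page)
    | some s =>
      -- split(',')[0]: split with a nonempty sep is always some and never empty
      let record := ((PySem.Str.split? s ",").getD []).headD ""
      if record = target then some s
      else if record < target then pvALoop page target (mid + 1) high
      else pvALoop page target low (mid - 1)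
  else none
termination_by (high + 1 - low).toNat
decreasing_by
  all_goals
    have h1 : low ≤ PySem.Int.floordiv (low + high) 2 := by
      rw [PySem.Int.le_floordiv_iff_mul_le (by omega)]; omega
    have h2 : PySem.Int.floordiv (low + high) 2 < high + 1 := by
      rw [PySem.Int.floordiv_lt_iff_lt_mul (by omega)]; omega
  · omega
  · omega

def binary_search_in_page_py (page : List String) (target : String) : Option String :=
  pvALoop page target 0 (PySem.List.len page - 1)

-- ===== PORT B =====
-- the inner recursion go(seg) of B
def pvBGo (target : String) (seg : List String) : Option String :=
  if seg.isEmpty then none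
  else
    let m : Nat := (seg.length - 1) / 2  -- (len(seg)-1)//2: len ≥ 1, so Nat division is exact here
    match PySem.List.pyGet? seg (m : Int) with
    | none => none  -- unreachable: m < len(seg)
    | some s =>
      let key := ((PySem.Str.split? s ",").getD []).headD ""
      if key = target then some s
      else if key < target then pvBGo target (PySem.List.slice seg (some ((m : Int) + 1)) none)
      else pvBGo target (PySem.List.slice seg none (some (m : Int)))
termination_by seg.length
decreasing_by
  · have hne : seg.length ≠ 0 := by simpa [List.isEmpty_iff_length_eq_zero] using ‹¬ seg.isEmpty = true›
    have hc : ((m : Int) + 1) = (((m + 1 : Nat)) : Int) := by push_cast; ring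
    rw [hc, PySem.List.slice_from_natCast]
    simp only [List.length_drop]
    omega
  · have hne : seg.length ≠ 0 := by simpa [List.isEmpty_iff_length_eq_zero] using ‹¬ seg.isEmpty = true›
    rw [PySem.List.slice_to_natCast]
    simp only [List.length_take]
    omega

def binary_search_in_page_py_alt (page : List String) (target : String) : Option String :=
  pvBGo target page

-- ===== PRECONDITION & SPEC =====
def Spec_binary_search_in_page_py (page : List String) (target : String) (out : Option String) : Prop := out = binary_search_in_page_py_alt page target
instance (page : List String) (target : String) (out : Option String) : Decidable (Spec_binary_search_in_page_py page target out) := by unfold Spec_binary_search_in_page_py; infer_instance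

-- ===== CLAIM (what is proved, stated in full; the proofs are below) =====
def Claim_equal_binary_search_in_page_py : Prop := ∀ (page : List String) (target : String), Dom_binary_search_in_page_py page target → Spec_binary_search_in_page_py page target (binary_search_in_page_py page target)

-- ===== LEMMAS AND PROOFS =====

-- A's loop on bounds (low, high) computes B's recursion on the segment page[low : high+1].
theorem pvLoop_eq_go (page : List String) (target : String) (low high : Int)
    (hl : 0 ≤ low) (hh : high < (page.length : Int)) :
    pvALoop page target low high =
      pvBGo target ((page.drop low.toNat).take (high + 1 - low).toNat) := by
  rw [pvALoop, pvBGo]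
  by_cases hle : low ≤ high
  · simp only [dif_pos hle]
    set seg := (page.drop low.toNat).take (high + 1 - low).toNat with hseg
    set n := (high + 1 - low).toNat with hn
    set m := (n - 1) / 2 with hm
    have hlen : seg.length = n := by
      simp [hseg, List.length_take, List.length_drop]; omega
    have hne : seg.isEmpty = false := by
      have hx : seg ≠ [] := by intro he; rw [he] at hlen; simp at hlen; omega
      simp [hx]
    simp only [hne, Bool.false_eq_true, if_false]
    have hmid : PySem.Int.floordiv (low + high) 2 = low + (m : Int) := by
      have h1 : low + (m : Int) ≤ PySem.Int.floordiv (low + high) 2 := by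
        rw [PySem.Int.le_floordiv_iff_mul_le (by omega)]; omega
      have h2 : PySem.Int.floordiv (low + high) 2 < low + (m : Int) + 1 := by
        rw [PySem.Int.floordiv_lt_iff_lt_mul (by omega)]; omega
      omega
    have hmn : m < n := by omega
    have hgetA : PySem.List.pyGet? page (PySem.Int.floordiv (low + high) 2) =
        page[low.toNat + m]? := by
      rw [hmid, PySem.List.pyGet?_of_nonneg page (by omega)]
      congr 1; omega
    have hgetB : PySem.List.pyGet? seg ((m : Nat) : Int) = page[low.toNat + m]? := by
      rw [PySem.List.pyGet?_natCast, hseg]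
      simp [hmn, List.getElem?_drop]
    rw [hlen, hgetA, hgetB]
    cases hp : page[low.toNat + m]? with
    | none => rfl
    | some s =>
      dsimp only
      split_ifs with heq hlt
      · rfl
      · rw [hmid, ← hm]
        have hstep : PySem.List.slice seg (some (((m : Nat) : Int) + 1)) none =
            (page.drop (low + (m : Int) + 1).toNat).take (high + 1 - (low + (m : Int) + 1)).toNat := by
          have hc : (((m : Nat) : Int) + 1) = (((m + 1 : Nat)) : Int) := by push_cast; ring
          rw [hc, PySem.List.slice_from_natCast, hseg, List.drop_take, List.drop_drop]
          congr 1
          · omega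
          · congr 1; omega
        rw [hstep]
        exact pvLoop_eq_go page target (low + m + 1) high (by omega) hh
      · rw [hmid, ← hm]
        have hstep : PySem.List.slice seg none (some ((m : Nat) : Int)) =
            (page.drop low.toNat).take ((low + (m : Int) - 1) + 1 - low).toNat := by
          rw [PySem.List.slice_to_natCast, hseg, List.take_take]
          congr 1; omega
        rw [hstep]
        exact pvLoop_eq_go page target low (low + (m : Int) - 1) hl (by omega)
  · simp only [dif_neg hle]
    have hz : (page.drop low.toNat).take (high + 1 - low).toNat = [] := by
      have : (high + 1 - low).toNat = 0 := by omega
      simp [this]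
    simp [hz]
termination_by (high + 1 - low).toNat
decreasing_by
  · omega
  · omega

-- ===== VERDICT (by name: the statement is the Claim_ definition above) =====
theorem binary_search_in_page_py_spec : Claim_equal_binary_search_in_page_py := by
  intro page target _
  unfold Spec_binary_search_in_page_py binary_search_in_page_py binary_search_in_page_py_alt
  rw [PySem.List.len_eq]
  have h := pvLoop_eq_go page target 0 ((page.length : Int) - 1) (by omega) (by omega)
  simpa using h
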